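-- pv_equiv track=rewrite | github.com/giovanebarcelos/ai-sandbox | class02/GO0214-ConstraintSatisfactionProblemsCSP.py | restricao_medico_horario
-- ===== SOURCE A (Python) =====
-- from typing import List, Dict, Set, Tuple, Optional, Callable
-- from itertools import combinations
--
-- exames = ["RaioX", "Sangue", "Ultrassom", "Ressonancia", "ECG"]
--
-- def restricao_medico_horario(atrib: Dict) -> bool:
--     """Médico só atende 1 exame por horário"""
--     for e1, e2 in combinations(exames, 2):
--         if f"{e1}_medico" in atrib and f"{e2}_medico" in atrib:
--             if f"{e1}_horario" in atrib and f"{e2}_horario" in atrib: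
--                 if (atrib[f"{e1}_medico"] == atrib[f"{e2}_medico"] and
--                     atrib[f"{e1}_horario"] == atrib[f"{e2}_horario"]):
--                     return False
--     return True
-- ===== SOURCE B (Python) =====
-- exames = ["RaioX", "Sangue", "Ultrassom", "Ressonancia", "ECG"]
--
-- def restricao_medico_horario(atrib):
--     """Medico so atende 1 exame por horario (single linear scan with a seen-set)"""
--     seen = set()
--     for e in exames:
--         if f"{e}_medico" in atrib and f"{e}_horario" in atrib:
--             t = (atrib[f"{e}_medico"], atrib[f"{e}_horario"])
--             if t in seen:
--                 return False
--             seen.add(t)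
--     return True
-- ===== Notes on version B (the rewrite author's own statement) =====
-- stated objective: simpler
-- what changed: Replaces the O(n^2) pairwise comparison over combinations(exames, 2) with a single linear pass that records each fully-assigned exam's (medico, horario) pair in a seen-set and fails on the first collision.
import Mathlib
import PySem

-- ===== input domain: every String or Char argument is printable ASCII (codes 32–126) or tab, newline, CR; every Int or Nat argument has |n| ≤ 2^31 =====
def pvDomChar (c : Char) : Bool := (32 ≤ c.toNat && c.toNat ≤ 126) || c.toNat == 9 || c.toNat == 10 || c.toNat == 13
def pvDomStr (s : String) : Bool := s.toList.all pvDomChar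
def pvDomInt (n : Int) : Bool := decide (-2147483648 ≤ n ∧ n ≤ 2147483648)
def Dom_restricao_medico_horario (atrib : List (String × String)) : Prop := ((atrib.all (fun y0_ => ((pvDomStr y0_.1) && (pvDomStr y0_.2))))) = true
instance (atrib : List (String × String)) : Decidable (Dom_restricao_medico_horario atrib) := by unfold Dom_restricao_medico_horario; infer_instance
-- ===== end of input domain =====

-- B replaces A's pairwise scan over combinations(exames, 2) by one linear pass with a seen-set; same return value, no speed claim.


-- ===== PORT A =====
-- the module-level constant 'exames'
def pvExames : List String := ["RaioX", "Sangue", "Ultrassom", "Ressonancia", "ECG"]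

-- itertools.combinations(l, 2), in itertools order
def pvComb2 : List String → List (String × String)
  | [] => []
  | x :: xs => xs.map (fun y => (x, y)) ++ pvComb2 xs

-- A's for-loop over the pairs, with the early 'return False'
def pvLoopA (d : PySem.Dict String String) : List (String × String) → Bool
  | [] => true
  | (e1, e2) :: rest =>
    if PySem.Dict.contains d (e1 ++ "_medico") && PySem.Dict.contains d (e2 ++ "_medico") then
      if PySem.Dict.contains d (e1 ++ "_horario") && PySem.Dict.contains d (e2 ++ "_horario") then
        if (PySem.Dict.getD d (e1 ++ "_medico") "" == PySem.Dict.getD d (e2 ++ "_medico") "") &&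
           (PySem.Dict.getD d (e1 ++ "_horario") "" == PySem.Dict.getD d (e2 ++ "_horario") "") then
          false
        else pvLoopA d rest
      else pvLoopA d rest
    else pvLoopA d rest

def restricao_medico_horario (atrib : List (String × String)) : Bool :=
  pvLoopA (PySem.Dict.mk atrib) (pvComb2 pvExames)

-- ===== PORT B =====
-- B's single pass over exames with the seen-set
def pvLoopB (d : PySem.Dict String String) (seen : PySem.Set (String × String)) : List String → Bool
  | [] => true
  | e :: rest =>
    if PySem.Dict.contains d (e ++ "_medico") && PySem.Dict.contains d (e ++ "_horario") then
      let t := (PySem.Dict.getD d (e ++ "_medico") "", PySem.Dict.getD d (e ++ "_horario") "")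
      if PySem.Set.contains seen t then false
      else pvLoopB d (PySem.Set.add seen t) rest
    else pvLoopB d seen rest

def restricao_medico_horario_alt (atrib : List (String × String)) : Bool :=
  pvLoopB (PySem.Dict.mk atrib) PySem.Set.empty pvExames

-- ===== PRECONDITION & SPEC =====
def Spec_restricao_medico_horario (atrib : List (String × String)) (out : Bool) : Prop := out = restricao_medico_horario_alt atrib
instance (atrib : List (String × String)) (out : Bool) : Decidable (Spec_restricao_medico_horario atrib out) := by unfold Spec_restricao_medico_horario; infer_instance

-- ===== CLAIM (what is proved, stated in full; the proofs are below) =====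
def Claim_equal_restricao_medico_horario : Prop := ∀ (atrib : List (String × String)), Dom_restricao_medico_horario atrib → Spec_restricao_medico_horario atrib (restricao_medico_horario atrib)

-- ===== LEMMAS AND PROOFS =====

-- the (medico, horario) pair of exam e, when both keys are present
def pvF (d : PySem.Dict String String) (e : String) : Option (String × String) :=
  if PySem.Dict.contains d (e ++ "_medico") && PySem.Dict.contains d (e ++ "_horario") then
    some (PySem.Dict.getD d (e ++ "_medico") "", PySem.Dict.getD d (e ++ "_horario") "")
  else none

-- A's per-pair violation condition, as one Bool
def pvViol (d : PySem.Dict String String) (e1 e2 : String) : Bool :=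
  PySem.Dict.contains d (e1 ++ "_medico") && PySem.Dict.contains d (e2 ++ "_medico") &&
  PySem.Dict.contains d (e1 ++ "_horario") && PySem.Dict.contains d (e2 ++ "_horario") &&
  (PySem.Dict.getD d (e1 ++ "_medico") "" == PySem.Dict.getD d (e2 ++ "_medico") "") &&
  (PySem.Dict.getD d (e1 ++ "_horario") "" == PySem.Dict.getD d (e2 ++ "_horario") "")

-- reference pairwise checker
def pvPW (d : PySem.Dict String String) : List String → Bool
  | [] => true
  | x :: xs => xs.all (fun y => !pvViol d x y) && pvPW d xs

theorem pvLoopA_cons (d : PySem.Dict String String) (p : String × String)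
    (rest : List (String × String)) :
    pvLoopA d (p :: rest) = (!pvViol d p.1 p.2 && pvLoopA d rest) := by
  rcases p with ⟨e1, e2⟩
  simp only [pvLoopA, pvViol]
  cases h1 : PySem.Dict.contains d (e1 ++ "_medico") <;>
    cases h2 : PySem.Dict.contains d (e2 ++ "_medico") <;>
    cases h3 : PySem.Dict.contains d (e1 ++ "_horario") <;>
    cases h4 : PySem.Dict.contains d (e2 ++ "_horario") <;>
    cases h5 : (PySem.Dict.getD d (e1 ++ "_medico") "" == PySem.Dict.getD d (e2 ++ "_medico") "") <;>
    cases h6 : (PySem.Dict.getD d (e1 ++ "_horario") "" == PySem.Dict.getD d (e2 ++ "_horario") "") <;>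
    simp

theorem pvLoopA_append (d : PySem.Dict String String) (l1 l2 : List (String × String)) :
    pvLoopA d (l1 ++ l2) = (pvLoopA d l1 && pvLoopA d l2) := by
  induction l1 with
  | nil => simp [pvLoopA]
  | cons p r ih => simp [pvLoopA_cons, ih, Bool.and_assoc]

theorem pvLoopA_map (d : PySem.Dict String String) (x : String) (xs : List String) :
    pvLoopA d (xs.map (fun y => (x, y))) = xs.all (fun y => !pvViol d x y) := by
  induction xs with
  | nil => simp [pvLoopA]
  | cons y ys ih => simp [pvLoopA_cons, ih]

theorem pvLoopA_comb2 (d : PySem.Dict String String) (l : List String) :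
    pvLoopA d (pvComb2 l) = pvPW d l := by
  induction l with
  | nil => rfl
  | cons x xs ih => simp [pvComb2, pvPW, pvLoopA_append, pvLoopA_map, ih]

theorem pvViol_iff (d : PySem.Dict String String) (e1 e2 : String) :
    pvViol d e1 e2 = true ↔ ∃ t, pvF d e1 = some t ∧ pvF d e2 = some t := by
  unfold pvViol pvF
  cases h1 : PySem.Dict.contains d (e1 ++ "_medico") <;>
    cases h2 : PySem.Dict.contains d (e2 ++ "_medico") <;>
    cases h3 : PySem.Dict.contains d (e1 ++ "_horario") <;>
    cases h4 : PySem.Dict.contains d (e2 ++ "_horario") <;>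
    simp [Prod.ext_iff]

-- B's loop characterised: true iff no pairwise collision in l and no element of l collides with seen
theorem pvLoopB_iff (d : PySem.Dict String String) (l : List String)
    (seen : PySem.Set (String × String)) :
    pvLoopB d seen l = true ↔
      (pvPW d l = true ∧ ∀ e ∈ l, ∀ t, pvF d e = some t → t ∉ seen) := by
  induction l generalizing seen with
  | nil => simp [pvLoopB, pvPW]
  | cons e rest ih =>
    rcases hfe : pvF d e with - | t
    · -- exam e is not fully assigned: B skips it, and e can violate nothing
      have hg : (PySem.Dict.contains d (e ++ "_medico") && PySem.Dict.contains d (e ++ "_horario")) = false := by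
        cases hgb : (PySem.Dict.contains d (e ++ "_medico") && PySem.Dict.contains d (e ++ "_horario"))
        · rfl
        · unfold pvF at hfe
          rw [hgb] at hfe
          simp at hfe
      have hstep : pvLoopB d seen (e :: rest) = pvLoopB d seen rest := by
        simp only [pvLoopB, hg, Bool.false_eq_true, if_false]
      have hnv : ∀ y, pvViol d e y = false := by
        intro y
        cases hvb : pvViol d e y
        · rfl
        · obtain ⟨t, ht1, -⟩ := (pvViol_iff d e y).mp hvb
          rw [hfe] at ht1
          simp at ht1
      rw [hstep, ih]
      constructor
      · rintro ⟨hpw, hall⟩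
        refine ⟨by simp [pvPW, hpw, hnv], ?_⟩
        intro b hb t htb
        rcases List.mem_cons.mp hb with rfl | hb'
        · rw [hfe] at htb
          simp at htb
        · exact hall b hb' t htb
      · rintro ⟨hpw, hall⟩
        simp only [pvPW, Bool.and_eq_true, List.all_eq_true] at hpw
        exact ⟨hpw.2, fun b hb t htb => hall b (List.mem_cons_of_mem _ hb) t htb⟩
    · -- exam e is fully assigned with pair t
      have hg : (PySem.Dict.contains d (e ++ "_medico") && PySem.Dict.contains d (e ++ "_horario")) = true := by
        cases hgb : (PySem.Dict.contains d (e ++ "_medico") && PySem.Dict.contains d (e ++ "_horario"))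
        · unfold pvF at hfe
          rw [hgb] at hfe
          simp at hfe
        · rfl
      have ht : t = (PySem.Dict.getD d (e ++ "_medico") "", PySem.Dict.getD d (e ++ "_horario") "") := by
        unfold pvF at hfe
        rw [hg] at hfe
        simp at hfe
        exact hfe.symm
      have hstep : pvLoopB d seen (e :: rest) =
          if PySem.Set.contains seen t then false else pvLoopB d (PySem.Set.add seen t) rest := by
        rw [ht]
        simp only [pvLoopB, hg, if_true]
      have hviol : ∀ y, (pvViol d e y = true ↔ pvF d y = some t) := by
        intro y
        rw [pvViol_iff]
        constructor
        · rintro ⟨u, hu1, hu2⟩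
          rw [hfe] at hu1
          injection hu1 with h
          rw [h]
          exact hu2
        · intro h
          exact ⟨t, hfe, h⟩
      by_cases hs : PySem.Set.contains seen t = true
      · have hmem : t ∈ seen := by
          simpa [PySem.Set.contains_eq_listContains] using hs
        rw [hstep, if_pos hs]
        constructor
        · intro h
          exact absurd h (by simp)
        · rintro ⟨-, hall⟩
          exact absurd hmem (hall e (List.mem_cons_self) t hfe)
      · have hnotmem : t ∉ seen := by
          simpa [PySem.Set.contains_eq_listContains] using hs
        rw [hstep, if_neg hs, ih]
        constructor
        · rintro ⟨hpw, hall⟩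
          constructor
          · simp only [pvPW, Bool.and_eq_true, List.all_eq_true]
            refine ⟨fun y hy => ?_, hpw⟩
            cases hvb : pvViol d e y
            · simp
            · exfalso
              exact (hall y hy t ((hviol y).mp hvb))
                ((PySem.Set.mem_add seen t t).mpr (Or.inr rfl))
          · intro b hb u hub
            rcases List.mem_cons.mp hb with rfl | hb'
            · rw [hfe] at hub
              injection hub with h
              rw [← h]
              exact hnotmem
            · intro hmem
              exact (hall b hb' u hub) ((PySem.Set.mem_add seen t u).mpr (Or.inl hmem))
        · rintro ⟨hpw, hall⟩
          simp only [pvPW, Bool.and_eq_true, List.all_eq_true] at hpw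
          obtain ⟨hnv, hpw'⟩ := hpw
          refine ⟨hpw', fun b hb u hub => ?_⟩
          intro hmemadd
          rcases (PySem.Set.mem_add seen t u).mp hmemadd with hmem | heq
          · exact (hall b (List.mem_cons_of_mem _ hb) u hub) hmem
          · have hv : pvViol d e b = true := (hviol b).mpr (by rw [hub, heq])
            have := hnv b hb
            simp [hv] at this

-- ===== VERDICT (by name: the statement is the Claim_ definition above) =====
theorem restricao_medico_horario_spec : Claim_equal_restricao_medico_horario := by
  intro atrib _
  unfold Spec_restricao_medico_horario restricao_medico_horario restricao_medico_horario_alt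
  rw [pvLoopA_comb2]
  set d := PySem.Dict.mk atrib
  have hB := pvLoopB_iff d pvExames PySem.Set.empty
  have hEmpty : ∀ t : String × String, t ∉ (PySem.Set.empty : PySem.Set (String × String)) := by
    intro t
    simp [PySem.Set.empty_eq]
  cases hA : pvPW d pvExames <;> cases hBv : pvLoopB d PySem.Set.empty pvExames
  · rfl
  · obtain ⟨hpw, -⟩ := hB.mp hBv
    rw [hA] at hpw
    exact absurd hpw (by simp)
  · have : pvLoopB d PySem.Set.empty pvExames = true :=
      hB.mpr ⟨hA, fun e _ t _ => hEmpty t⟩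
    rw [hBv] at this
    exact absurd this (by simp)
  · rfl
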